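-- pv_equiv track=rewrite | github.com/nagataaaas/fast-ulid | tests/test.py | increment_ulid
-- ===== SOURCE A (Python) =====
-- def increment_ulid(ulid):
--     # this should work
--     ENCODING = "0123456789ABCDEFGHJKMNPQRSTVWXYZ"
--     randomness = [0 for _ in range(16)]
--     for i in range(16):
--         randomness[i] = ENCODING.index(ulid[10 + i])
--     randomness[-1] += 1
--     for i in range(15, -1, -1):
--         if randomness[i] >= 32 and i != 0:
--             randomness[i] = 0
--             randomness[i - 1] += 1
--         elif randomness[i] >= 32 and i == 0:
--             raise ValueError
--         else:
--             break
--     return ulid[:10] + "".join(ENCODING[i] for i in randomness)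
-- ===== SOURCE B (Python) =====
-- def increment_ulid(ulid):
--     # Decode the 16 randomness chars to one integer, add 1, re-encode.
--     ENCODING = "0123456789ABCDEFGHJKMNPQRSTVWXYZ"
--     value = 0
--     for i in range(16):
--         value = value * 32 + ENCODING.index(ulid[10 + i])
--     value += 1
--     if value >= 32 ** 16:
--         raise ValueError
--     digits = []
--     for _ in range(16):
--         digits.append(ENCODING[value % 32])
--         value //= 32
--     return ulid[:10] + "".join(reversed(digits))
-- ===== Notes on version B (the rewrite author's own statement) =====
-- stated objective: simpler
-- what changed: Replaces the in-place per-digit carry-propagation loop over a 16-slot list by decoding the 16 randomness chars into one integer (Horner), adding 1, and re-encoding with 16 mod/div steps.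
-- outside the precondition, e.g. on increment_ulid('Z'): A raises IndexError, B raises IndexError; on increment_ulid('0000000000ZZZZZZZZZZZZZZZZ'): A raises ValueError, B raises ValueError
import Mathlib
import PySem

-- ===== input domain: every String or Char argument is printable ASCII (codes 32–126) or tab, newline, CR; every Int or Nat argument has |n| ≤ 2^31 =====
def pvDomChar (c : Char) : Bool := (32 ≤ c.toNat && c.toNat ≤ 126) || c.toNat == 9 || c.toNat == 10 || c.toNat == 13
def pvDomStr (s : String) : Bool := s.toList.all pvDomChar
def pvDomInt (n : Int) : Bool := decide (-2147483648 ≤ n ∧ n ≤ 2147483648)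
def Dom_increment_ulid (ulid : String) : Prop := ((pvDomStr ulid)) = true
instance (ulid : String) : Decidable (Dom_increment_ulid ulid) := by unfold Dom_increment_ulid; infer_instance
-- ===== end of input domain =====

-- B replaces A's in-place per-digit carry loop by decode-to-integer / add 1 / re-encode (simpler; same cost).

-- ===== PORT A =====
-- shared constant: ENCODING (both Pythons define the same string literal; used only as a char sequence)
def pvENC : List Char := ['0','1','2','3','4','5','6','7','8','9','A','B','C','D','E','F','G','H','J','K','M','N','P','Q','R','S','T','V','W','X','Y','Z']

-- ENCODING.index(ulid[10 + i]) — both Pythons contain this exact expression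
def pvDigit (s : List Char) (i : Nat) : Int :=
  (((PySem.List.index? pvENC ((PySem.List.pyGet? s ((10 : Int) + (i : Int))).getD ' ')).getD 0 : Nat) : Int)

-- the 'for i in range(15, -1, -1)' carry loop of A (break → return; the i == 0 raise is excluded by Pre_)
def pvCarryA (r : List Int) (i : Nat) : List Int :=
  if 32 ≤ r.getD i 0 then
    if h : i ≠ 0 then
      let r' := r.set i 0
      pvCarryA (r'.set (i - 1) (r'.getD (i - 1) 0 + 1)) (i - 1)
    else r   -- Python: raise ValueError (outside Pre_)
  else r     -- break
termination_by i
decreasing_by omega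

def increment_ulid (ulid : String) : String :=
  let s := ulid.toList
  let randomness : List Int := (List.range 16).map (fun i => pvDigit s i)
  let randomness := randomness.set 15 (randomness.getD 15 0 + 1)
  let randomness := pvCarryA randomness 15
  String.ofList (PySem.List.slice s none (some 10) ++
    randomness.map (fun v => (PySem.List.pyGet? pvENC v).getD ' '))

-- ===== PORT B =====
def increment_ulid_alt (ulid : String) : String :=
  let s := ulid.toList
  let value : Int := (List.range 16).foldl (fun acc i => acc * 32 + pvDigit s i) 0
  let value := value + 1
  if 32 ^ 16 ≤ value then String.ofList []   -- Source B: raise ValueError (outside Pre_)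
  else
    let p := (List.range 16).foldl
      (fun (p : List Char × Int) (_ : Nat) =>
        (p.1 ++ [(PySem.List.pyGet? pvENC (PySem.Int.mod p.2 32)).getD ' '],
         PySem.Int.floordiv p.2 32))
      ([], value)
    String.ofList (PySem.List.slice s none (some 10) ++ p.1.reverse)

-- ===== PRECONDITION & SPEC =====
-- Pre_ excludes exactly the inputs where A raises: strings shorter than 26 (IndexError),
-- a randomness char outside ENCODING (ValueError), and all-'Z' randomness (overflow ValueError).
def Pre_increment_ulid (ulid : String) : Prop :=
  26 ≤ ulid.toList.length ∧
  (∀ i ∈ List.range 16, ulid.toList.getD (10 + i) ' ' ∈ pvENC) ∧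
  ¬ (∀ i ∈ List.range 16, ulid.toList.getD (10 + i) ' ' = 'Z')
instance (ulid : String) : Decidable (Pre_increment_ulid ulid) := by
  unfold Pre_increment_ulid; infer_instance

def pvWitness_increment_ulid : String := "00000000000000000000000000"

def Spec_increment_ulid (ulid : String) (out : String) : Prop := out = increment_ulid_alt ulid
instance (ulid : String) (out : String) : Decidable (Spec_increment_ulid ulid out) := by
  unfold Spec_increment_ulid; infer_instance

-- ===== CLAIM (what is proved, stated in full; the proofs are below) =====
def Claim_equal_increment_ulid : Prop := ∀ (ulid : String), Dom_increment_ulid ulid → Pre_increment_ulid ulid → Spec_increment_ulid ulid (increment_ulid ulid)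

-- ===== LEMMAS AND PROOFS =====

-- Horner value of a most-significant-first base-32 digit list (proof-side only)
def pvVal (l : List Int) : Int := l.foldl (fun a d => a * 32 + d) 0

theorem pvVal_foldl (t : List Int) : ∀ a : Int,
    t.foldl (fun a d => a * 32 + d) a = a * 32 ^ t.length + pvVal t := by
  induction t with
  | nil => intro a; simp [pvVal]
  | cons d t ih =>
    intro a
    simp only [List.foldl_cons, List.length_cons, pvVal]
    rw [ih (a * 32 + d), ih (0 * 32 + d)]
    ring

theorem pvVal_append (q t : List Int) :
    pvVal (q ++ t) = pvVal q * 32 ^ t.length + pvVal t := by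
  simp only [pvVal, List.foldl_append]
  exact pvVal_foldl t (pvVal q)

theorem pvVal_replicate31 (k : Nat) : pvVal (List.replicate k (31 : Int)) = 32 ^ k - 1 := by
  induction k with
  | zero => simp [pvVal]
  | succ k ih =>
    rw [List.replicate_succ', pvVal_append, ih]
    simp [pvVal]
    ring

theorem pvVal_replicate0 (k : Nat) : pvVal (List.replicate k (0 : Int)) = 0 := by
  induction k with
  | zero => simp [pvVal]
  | succ k ih => rw [List.replicate_succ', pvVal_append, ih]; simp [pvVal]

theorem pvVal_succ (q : List Int) (y : Int) (k : Nat) :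
    pvVal (q ++ y :: List.replicate k 31) + 1 = pvVal (q ++ (y + 1) :: List.replicate k 0) := by
  have h1 : (y :: List.replicate k (31:Int)) = [y] ++ List.replicate k 31 := rfl
  have h2 : ((y+1) :: List.replicate k (0:Int)) = [y+1] ++ List.replicate k 0 := rfl
  rw [h1, h2, pvVal_append, pvVal_append, pvVal_append, pvVal_append,
      pvVal_replicate31, pvVal_replicate0]
  simp [pvVal]
  ring

theorem pvVal_lt (l : List Int) (h : ∀ e ∈ l, e < 32) : pvVal l < 32 ^ l.length := by
  induction l with
  | nil => simp [pvVal]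
  | cons d t ih =>
    have hd : d < 32 := h d (by simp)
    have ht := ih (fun e he => h e (by simp [he]))
    have hpos : (0:Int) < 32 ^ t.length := by positivity
    have hv : pvVal (d :: t) = d * 32 ^ t.length + pvVal t := by
      simp only [pvVal, List.foldl_cons]
      rw [pvVal_foldl]
      ring_nf
      simp [pvVal]
    rw [hv]
    simp only [List.length_cons, pow_succ]
    nlinarith

theorem pvCarryA_stop (r : List Int) (i : Nat) (h : r.getD i 0 < 32) : pvCarryA r i = r := by
  rw [pvCarryA, if_neg (not_le.mpr h)]

theorem getD_mid (q : List Int) (y : Int) (t : List Int) : (q ++ y :: t).getD q.length 0 = y := by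
  rw [List.getD_append_right q _ 0 q.length (le_refl _)]
  simp

theorem set_mid (q : List Int) (y : Int) (t : List Int) (v : Int) :
    (q ++ y :: t).set q.length v = q ++ v :: t := by
  rw [List.set_append]
  simp

-- the carry loop on a trailing run of 32s: zeroes the run and increments the digit before it
theorem pvCarryA_run (j : Nat) : ∀ (q z : List Int) (y : Int), y + 1 < 32 →
    pvCarryA (q ++ y :: (List.replicate j 31 ++ 32 :: z)) (q.length + 1 + j)
      = q ++ (y + 1) :: (List.replicate j 0 ++ 0 :: z) := by
  induction j with
  | zero =>
    intro q z y hy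
    simp only [List.replicate_zero, List.nil_append]
    rw [pvCarryA]
    have hget : (q ++ y :: 32 :: z).getD (q.length + 1 + 0) 0 = 32 := by
      have hsp : q ++ y :: (32:Int) :: z = (q ++ [y]) ++ 32 :: z := by simp
      rw [hsp]
      have hl : (q ++ [y]).length = q.length + 1 := by simp
      rw [← hl]
      exact getD_mid (q ++ [y]) 32 z
    rw [hget]
    simp only [le_refl, if_true]
    rw [dif_pos (by omega : q.length + 1 + 0 ≠ 0)]
    have hset1 : (q ++ y :: 32 :: z).set (q.length + 1 + 0) 0 = q ++ y :: 0 :: z := by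
      have hsp : q ++ y :: (32:Int) :: z = (q ++ [y]) ++ 32 :: z := by simp
      rw [hsp]
      have hl : (q ++ [y]).length = q.length + 1 + 0 := by simp
      rw [← hl, set_mid]
      simp
    simp only [hset1]
    have hget2 : (q ++ y :: (0:Int) :: z).getD (q.length + 1 + 0 - 1) 0 = y := by
      have h0 : q.length + 1 + 0 - 1 = q.length := by omega
      rw [h0]; exact getD_mid q y (0 :: z)
    rw [hget2]
    have hset2 : (q ++ y :: (0:Int) :: z).set (q.length + 1 + 0 - 1) (y + 1) = q ++ (y+1) :: 0 :: z := by
      have h0 : q.length + 1 + 0 - 1 = q.length := by omega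
      rw [h0]; exact set_mid q y ((0:Int) :: z) (y+1)
    rw [hset2]
    have h0 : q.length + 1 + 0 - 1 = q.length := by omega
    rw [h0]
    apply pvCarryA_stop
    rw [getD_mid]
    omega
  | succ j ih =>
    intro q z y hy
    rw [pvCarryA]
    have hsplit : q ++ y :: (List.replicate (j+1) (31:Int) ++ 32 :: z)
        = (q ++ y :: List.replicate (j+1) 31) ++ 32 :: z := by simp
    have hlen : (q ++ y :: List.replicate (j+1) (31:Int)).length = q.length + 1 + (j+1) := by
      simp only [List.length_append, List.length_cons, List.length_replicate]; omega
    have hget : (q ++ y :: (List.replicate (j+1) (31:Int) ++ 32 :: z)).getD (q.length + 1 + (j+1)) 0 = 32 := by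
      rw [hsplit, ← hlen]; exact getD_mid _ 32 z
    rw [hget]
    simp only [le_refl, if_true]
    rw [dif_pos (by omega : q.length + 1 + (j+1) ≠ 0)]
    have hset1 : (q ++ y :: (List.replicate (j+1) (31:Int) ++ 32 :: z)).set (q.length + 1 + (j+1)) 0
        = q ++ y :: (List.replicate (j+1) 31 ++ 0 :: z) := by
      rw [hsplit, ← hlen, set_mid]; simp
    simp only [hset1]
    have hsplit2 : q ++ y :: (List.replicate (j+1) (31:Int) ++ 0 :: z)
        = (q ++ y :: List.replicate j 31) ++ 31 :: (0 :: z) := by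
      rw [List.replicate_succ']
      simp
    have hlen2 : (q ++ y :: List.replicate j (31:Int)).length = q.length + 1 + j := by
      simp only [List.length_append, List.length_cons, List.length_replicate]; omega
    have hget2 : (q ++ y :: (List.replicate (j+1) (31:Int) ++ 0 :: z)).getD (q.length + 1 + (j+1) - 1) 0 = 31 := by
      have h3 : q.length + 1 + (j+1) - 1 = q.length + 1 + j := by omega
      rw [h3, hsplit2, ← hlen2]
      exact getD_mid _ 31 _
    rw [hget2]
    have hset2 : (q ++ y :: (List.replicate (j+1) (31:Int) ++ 0 :: z)).set (q.length + 1 + (j+1) - 1) (31 + 1)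
        = q ++ y :: (List.replicate j 31 ++ 32 :: (0 :: z)) := by
      have h3 : q.length + 1 + (j+1) - 1 = q.length + 1 + j := by omega
      rw [h3, hsplit2, ← hlen2, set_mid]
      norm_num
    rw [hset2]
    have h4 : q.length + 1 + (j+1) - 1 = q.length + 1 + j := by omega
    rw [h4, ih q (0 :: z) y hy]
    rw [List.replicate_succ']
    simp

-- any nonempty digit list that is not all 31 splits off its maximal trailing run of 31s
theorem pvDecomp (l : List Int) (hne : l ≠ []) (hnot : ¬ ∀ e ∈ l, e = 31) :
    ∃ (q : List Int) (y : Int) (k : Nat), l = q ++ y :: List.replicate k 31 ∧ y ≠ 31 := by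
  induction l using List.reverseRecOn with
  | nil => exact absurd rfl hne
  | append_singleton l e ih =>
    by_cases he : e = 31
    · subst he
      have hl : l ≠ [] := by
        rintro rfl
        exact hnot (by simp)
      have hln : ¬ ∀ x ∈ l, x = 31 := by
        intro hall
        apply hnot
        intro x hx
        rcases List.mem_append.mp hx with h | h
        · exact hall x h
        · simpa using h
      obtain ⟨q, y, k, hqe, hy⟩ := ih hl hln
      exact ⟨q, y, k + 1, by rw [hqe, List.replicate_succ']; simp, hy⟩
    · exact ⟨l, e, 0, by simp, he⟩

theorem pvEncFacts : ∀ c ∈ pvENC,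
    ((PySem.List.index? pvENC c).getD 0 : Nat) < 32 ∧
    (((PySem.List.index? pvENC c).getD 0 : Nat) = 31 ↔ c = 'Z') := by
  intro c hc
  fin_cases hc <;> decide

-- the 16-step mod/div extraction loop of B, on the value of a valid digit list
theorem pvExtract (l : List Int) (hb : ∀ e ∈ l, 0 ≤ e ∧ e < 32) : ∀ acc : List Char,
    (List.range l.length).foldl
      (fun (p : List Char × Int) (_ : Nat) =>
        (p.1 ++ [(PySem.List.pyGet? pvENC (PySem.Int.mod p.2 32)).getD ' '],
         PySem.Int.floordiv p.2 32))
      (acc, pvVal l)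
    = (acc ++ (l.map (fun v => (PySem.List.pyGet? pvENC v).getD ' ')).reverse, 0) := by
  induction l using List.reverseRecOn with
  | nil => intro acc; simp [pvVal]
  | append_singleton l e ih =>
    intro acc
    have hbl : ∀ x ∈ l, (0:Int) ≤ x ∧ x < 32 := fun x hx => hb x (by simp [hx])
    have he : (0:Int) ≤ e ∧ e < 32 := hb e (by simp)
    have hV : pvVal (l ++ [e]) = pvVal l * 32 + e := by
      rw [pvVal_append]; simp [pvVal]
    have hmod : PySem.Int.mod (pvVal (l ++ [e])) 32 = e := by
      rw [PySem.Int.mod_eq_emod_of_pos (by norm_num : (0:Int) < 32), hV]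
      omega
    have hdiv : PySem.Int.floordiv (pvVal (l ++ [e])) 32 = pvVal l := by
      rw [PySem.Int.floordiv_eq_ediv_of_pos (by norm_num : (0:Int) < 32), hV]
      omega
    have hlen : (l ++ [e]).length = l.length + 1 := by simp
    rw [hlen, List.range_succ_eq_map, List.foldl_cons, List.foldl_map]
    simp only [hmod, hdiv]
    rw [ih hbl (acc ++ [(PySem.List.pyGet? pvENC e).getD ' '])]
    simp

-- ===== VERDICT (by name: the statement is the Claim_ definition above) =====
theorem increment_ulid_spec : Claim_equal_increment_ulid := by
  intro ulid _hdom hpre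
  obtain ⟨hlen, hmem, hnotZ⟩ := hpre
  unfold Spec_increment_ulid increment_ulid increment_ulid_alt
  simp only []
  -- the character and digit at randomness position i
  have hchar : ∀ i : Nat, i < 16 →
      (PySem.List.pyGet? ulid.toList ((10:Int)+(i:Int))).getD ' ' = ulid.toList.getD (10+i) ' ' := by
    intro i hi
    have hcast : ((10:Int)+(i:Int)) = ((10+i : Nat) : Int) := by push_cast; ring
    have hlt : 10 + i < ulid.toList.length := by omega
    rw [hcast, PySem.List.pyGet?_natCast, List.getElem?_eq_getElem hlt,
        List.getD_eq_getElem _ _ hlt]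
    rfl
  have hdig : ∀ i : Nat, i < 16 → pvDigit ulid.toList i
      = (((PySem.List.index? pvENC (ulid.toList.getD (10+i) ' ')).getD 0 : Nat) : Int) := by
    intro i hi
    unfold pvDigit
    rw [hchar i hi]
  set dl : List Int := (List.range 16).map (fun i => pvDigit ulid.toList i) with hdl
  have hlen16 : dl.length = 16 := by rw [hdl]; simp
  have hball : ∀ e ∈ dl, 0 ≤ e ∧ e < 32 := by
    intro e hedl
    rw [hdl] at hedl
    obtain ⟨i, hi, rfl⟩ := List.mem_map.mp hedl
    have hi16 : i < 16 := List.mem_range.mp hi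
    rw [hdig i hi16]
    have hcm := hmem i (List.mem_range.mpr hi16)
    have := (pvEncFacts _ hcm).1
    omega
  have hnota : ¬ ∀ e ∈ dl, e = 31 := by
    intro hall
    apply hnotZ
    intro i hi
    have hi16 : i < 16 := List.mem_range.mp hi
    have hedl : pvDigit ulid.toList i ∈ dl := by
      rw [hdl]; exact List.mem_map.mpr ⟨i, List.mem_range.mpr hi16, rfl⟩
    have h31 : pvDigit ulid.toList i = 31 := hall _ hedl
    rw [hdig i hi16] at h31
    have hcm := hmem i (List.mem_range.mpr hi16)
    exact ((pvEncFacts _ hcm).2).mp (by exact_mod_cast h31)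
  obtain ⟨q, y, k, hdecomp, hy31⟩ := pvDecomp dl (by rw [hdl]; simp) hnota
  have hymem : y ∈ dl := by rw [hdecomp]; simp
  have hyb := hball y hymem
  have hy32 : y + 1 < 32 := by
    rcases hyb with ⟨h0, h1⟩
    omega
  have hql : q.length + 1 + k = 16 := by
    have h := hlen16
    rw [hdecomp] at h
    simp only [List.length_append, List.length_cons, List.length_replicate] at h
    omega
  -- the carried digit list
  have hA : pvCarryA (dl.set 15 (dl.getD 15 0 + 1)) 15 = q ++ (y+1) :: List.replicate k 0 := by
    cases k with
    | zero =>
      have hq15 : q.length = 15 := by omega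
      simp only [List.replicate_zero] at hdecomp ⊢
      rw [hdecomp, ← hq15, getD_mid, set_mid]
      apply pvCarryA_stop
      rw [getD_mid]
      omega
    | succ j =>
      have hpre15 : (q ++ y :: List.replicate j (31:Int)).length = 15 := by
        simp only [List.length_append, List.length_cons, List.length_replicate]; omega
      have hsplit : q ++ y :: List.replicate (j+1) (31:Int)
          = (q ++ y :: List.replicate j 31) ++ 31 :: [] := by
        rw [List.replicate_succ']; simp
      have hgd : dl.getD 15 0 = 31 := by
        rw [hdecomp, hsplit, ← hpre15]; exact getD_mid _ 31 []
      have hst : dl.set 15 (31 + 1) = q ++ y :: (List.replicate j 31 ++ 32 :: []) := by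
        rw [hdecomp, hsplit, ← hpre15, set_mid]
        norm_num
      rw [hgd, hst]
      have h15 : q.length + 1 + j = 15 := by omega
      rw [← h15, pvCarryA_run j q [] y hy32, List.replicate_succ']
  -- B's decoded value
  have hfoldv : (List.range 16).foldl (fun acc i => acc * 32 + pvDigit ulid.toList i) 0 = pvVal dl := by
    rw [hdl, pvVal, List.foldl_map]
  have hsucc : pvVal dl + 1 = pvVal (q ++ (y+1) :: List.replicate k 0) := by
    rw [hdecomp]; exact pvVal_succ q y k
  have hRlen : (q ++ (y+1) :: List.replicate k (0:Int)).length = 16 := by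
    simp only [List.length_append, List.length_cons, List.length_replicate]; omega
  have hbR : ∀ e ∈ q ++ (y+1) :: List.replicate k (0:Int), 0 ≤ e ∧ e < 32 := by
    intro e he
    rcases List.mem_append.mp he with h | h
    · exact hball e (by rw [hdecomp]; exact List.mem_append.mpr (Or.inl h))
    · rcases List.mem_cons.mp h with rfl | h
      · omega
      · have := List.eq_of_mem_replicate h
        omega
  have hbound : pvVal (q ++ (y+1) :: List.replicate k (0:Int)) < 32 ^ 16 := by
    have := pvVal_lt _ (fun e he => (hbR e he).2)
    rwa [hRlen] at this
  rw [hfoldv, hsucc]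
  rw [if_neg (not_le.mpr hbound)]
  have hex := pvExtract _ hbR []
  rw [hRlen] at hex
  rw [hex, hA]
  simp
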